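-- pv_equiv track=rewrite | github.com/nearai/program_synthesis | program_synthesis/naps/uast/uast_to_java.py | _convert_type
-- ===== SOURCE A (Python) =====
-- def _convert_type(type_):
--     if type_[-1] == '#':
--         return _convert_type(type_[:-1])
--     if type_ == "char*":
--         return "String"
--     if type_[-1] == "*":
--         return _convert_type(type_[:-1]) + "[]"
--     return type_
-- ===== SOURCE B (Python) =====
-- def _convert_type(type_):
--     # Single right-to-left scan: find the maximal trailing run of '#'/'*',
--     # count the stars in it, and build the result in closed form.
--     i = len(type_)
--     while i > 0 and type_[i - 1] in '#*':
--         i -= 1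
--     base = type_[:i]
--     stars = type_.count('*', i)
--     if base == "char" and i < len(type_) and type_[i] == '*':
--         return "String" + "[]" * (stars - 1)
--     return base + "[]" * stars
-- ===== Notes on version B (the rewrite author's own statement) =====
-- stated objective: simpler
-- what changed: A's branch-per-character recursion (one recursive call per trailing '#'/'*', appending '[]' on the way back up) is replaced by a single right-to-left scan that locates the trailing '#'/'*' run, counts its stars, and builds the result in closed form ('String' or base, plus '[]'*stars).
-- outside the precondition, e.g. on _convert_type('#'): A raises IndexError, B returns ''; on _convert_type('*'): A raises IndexError, B returns '[]'
import Mathlib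
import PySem

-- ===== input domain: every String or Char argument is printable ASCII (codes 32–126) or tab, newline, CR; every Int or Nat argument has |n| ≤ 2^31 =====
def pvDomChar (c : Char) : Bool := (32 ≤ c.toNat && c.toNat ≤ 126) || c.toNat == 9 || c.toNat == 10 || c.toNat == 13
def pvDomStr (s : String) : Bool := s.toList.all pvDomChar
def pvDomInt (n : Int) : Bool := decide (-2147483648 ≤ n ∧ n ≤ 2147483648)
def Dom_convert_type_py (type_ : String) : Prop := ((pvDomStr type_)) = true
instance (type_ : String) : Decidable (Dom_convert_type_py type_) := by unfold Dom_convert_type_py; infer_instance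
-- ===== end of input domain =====

-- B replaces A's branch-per-suffix-character recursion by one right-to-left scan that
-- finds the trailing '#'/'*' run and builds the answer in closed form (objective: simpler).

-- ===== PORT A =====
-- used by convA's decreasing_by: type_[:-1] is dropLast
theorem pv_slice_neg_one (cs : List Char) :
    PySem.List.slice cs none (some (-1)) = cs.dropLast := by
  simp [pysem, List.dropLast_eq_take]

-- used by convA's decreasing_by: type_[-1] succeeds only on a nonempty string
theorem pv_pyGet_last_ne_nil {cs : List Char} {c : Char}
    (h : PySem.List.pyGet? cs (-1) = some c) : cs ≠ [] := by
  rintro rfl; simp [PySem.List.pyGet?, PySem.List.pyIdx?] at h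

-- literal transliteration of A's recursion (on the character list of the string;
-- `none` from pyGet? is Python's IndexError, excluded by Pre_)
def convA (cs : List Char) : List Char :=
  match h : PySem.List.pyGet? cs (-1) with
  | none => []  -- IndexError in Python; outside Pre_
  | some c =>
    if c = '#' then convA (PySem.List.slice cs none (some (-1)))
    else if cs = ['c', 'h', 'a', 'r', '*'] then ['S', 't', 'r', 'i', 'n', 'g']
    else if c = '*' then convA (PySem.List.slice cs none (some (-1))) ++ ['[', ']']
    else cs
termination_by cs.length
decreasing_by
  all_goals
    rw [pv_slice_neg_one, List.length_dropLast]
    have hne := pv_pyGet_last_ne_nil h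
    have := List.length_pos_of_ne_nil hne
    omega

def convert_type_py (type_ : String) : String := String.ofList (convA type_.toList)

-- ===== PORT B =====
-- the `while i > 0 and type_[i-1] in '#*': i -= 1` loop of B
def findB (cs : List Char) : Nat → Nat
  | 0 => 0
  | i + 1 => if cs.getD i ' ' = '#' ∨ cs.getD i ' ' = '*' then findB cs i else i + 1

-- "[]" * n
def repBr : Nat → List Char
  | 0 => []
  | n + 1 => '[' :: ']' :: repBr n

-- literal transliteration of B (Source B) on the character list
def convB (cs : List Char) : List Char :=
  let i := findB cs cs.length
  let base := cs.take i
  let stars := (cs.drop i).count '*'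
  if base = ['c', 'h', 'a', 'r'] ∧ i < cs.length ∧ cs.getD i ' ' = '*' then
    ['S', 't', 'r', 'i', 'n', 'g'] ++ repBr (stars - 1)
  else base ++ repBr stars

def convert_type_py_alt (type_ : String) : String := String.ofList (convB type_.toList)

-- ===== PRECONDITION & SPEC =====
-- Pre_ excludes exactly the strings made only of '#' and '*' (including ""), on which
-- A's `type_[-1]` eventually hits the empty string and raises IndexError.
def Pre_convert_type_py (type_ : String) : Prop :=
  (type_.toList.any (fun c => !(c == '#' || c == '*'))) = true
instance (type_ : String) : Decidable (Pre_convert_type_py type_) := by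
  unfold Pre_convert_type_py; infer_instance
def pvWitness_convert_type_py : String := "int**"

def Spec_convert_type_py (type_ : String) (out : String) : Prop := out = convert_type_py_alt type_
instance (type_ : String) (out : String) : Decidable (Spec_convert_type_py type_ out) := by unfold Spec_convert_type_py; infer_instance

-- ===== CLAIM (what is proved, stated in full; the proofs are below) =====
def Claim_equal_convert_type_py : Prop := ∀ (type_ : String), Dom_convert_type_py type_ → Pre_convert_type_py type_ → Spec_convert_type_py type_ (convert_type_py type_)

-- ===== LEMMAS AND PROOFS =====

theorem findB_le (cs : List Char) : ∀ i, findB cs i ≤ i := by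
  intro i; induction i with
  | zero => simp [findB]
  | succ i ih => simp only [findB]; split <;> omega

theorem findB_append (ys : List Char) (c : Char) :
    ∀ i, i ≤ ys.length → findB (ys ++ [c]) i = findB ys i := by
  intro i; induction i with
  | zero => intro _; rfl
  | succ i ih =>
    intro hi
    have hg : (ys ++ [c]).getD i ' ' = ys.getD i ' ' := by
      simp [List.getD, List.getElem?_append_left (by omega : i < ys.length)]
    simp only [findB, hg]
    split <;> simp [ih (by omega)]

theorem getD_concat_len (ys : List Char) (c : Char) :
    (ys ++ [c]).getD ys.length ' ' = c := by
  simp [List.getD]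

theorem repBr_succ_right (n : Nat) : repBr (n + 1) = repBr n ++ ['[', ']'] := by
  induction n with
  | zero => rfl
  | succ n ih =>
    show '[' :: ']' :: repBr (n + 1) = ('[' :: ']' :: repBr n) ++ ['[', ']']
    rw [ih]; simp

-- B is invariant under a trailing '#'
theorem convB_hash (ys : List Char) : convB (ys ++ ['#']) = convB ys := by
  have hlen : (ys ++ ['#']).length = ys.length + 1 := by simp
  have hle := findB_le ys ys.length
  have hi : findB (ys ++ ['#']) (ys ++ ['#']).length = findB ys ys.length := by
    rw [hlen]
    simp only [findB, getD_concat_len]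
    rw [if_pos (by simp)]
    exact findB_append ys '#' ys.length le_rfl
  simp only [convB, hi]
  rw [List.take_append_of_le_length hle, List.drop_append_of_le_length hle]
  rcases Nat.lt_or_ge (findB ys ys.length) ys.length with hlt | hge
  · simp [List.count_append, hlt, Nat.lt_succ_of_lt hlt, hlen]
  · have heq : findB ys ys.length = ys.length := le_antisymm hle hge
    simp [heq, hlen]

-- B turns a trailing '*' into one more "[]" (except on "char*", A's special case)
theorem convB_star (ys : List Char) (hys : ys ≠ ['c', 'h', 'a', 'r']) :
    convB (ys ++ ['*']) = convB ys ++ ['[', ']'] := by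
  have hlen : (ys ++ ['*']).length = ys.length + 1 := by simp
  have hle := findB_le ys ys.length
  have hi : findB (ys ++ ['*']) (ys ++ ['*']).length = findB ys ys.length := by
    rw [hlen]
    simp only [findB, getD_concat_len]
    rw [if_pos (by simp)]
    exact findB_append ys '*' ys.length le_rfl
  simp only [convB, hi]
  rw [List.take_append_of_le_length hle, List.drop_append_of_le_length hle]
  rcases Nat.lt_or_ge (findB ys ys.length) ys.length with hlt | hge
  · have hg : (ys ++ ['*']).getD (findB ys ys.length) ' ' = ys.getD (findB ys ys.length) ' ' := by
      simp [List.getD, List.getElem?_append_left hlt]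
    have hcnt : ((ys.drop (findB ys ys.length)) ++ ['*']).count '*'
        = (ys.drop (findB ys ys.length)).count '*' + 1 := by
      simp [List.count_append]
    rw [hcnt]
    by_cases hcond : ys.take (findB ys ys.length) = ['c', 'h', 'a', 'r']
        ∧ findB ys ys.length < ys.length ∧ ys.getD (findB ys ys.length) ' ' = '*'
    · have hmem : '*' ∈ ys.drop (findB ys ys.length) := by
        rcases hcond with ⟨_, h1, h2⟩
        have h2g : ys[findB ys ys.length]'h1 = '*' := by
          rw [← h2]; simp [List.getD, List.getElem?_eq_getElem h1]
        refine List.mem_iff_getElem.mpr ⟨0, by simp; omega, ?_⟩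
        rw [← List.getElem_drop']
        · simpa using h2g
        · omega
      have hpos : 1 ≤ (ys.drop (findB ys ys.length)).count '*' :=
        List.one_le_count_iff.mpr hmem
      rw [if_pos ⟨hcond.1, by simp; omega, by rw [hg]; exact hcond.2.2⟩, if_pos hcond,
          Nat.add_sub_cancel]
      have e : repBr ((ys.drop (findB ys ys.length)).count '*')
          = repBr ((ys.drop (findB ys ys.length)).count '*' - 1) ++ ['[', ']'] := by
        conv_lhs => rw [← Nat.succ_pred_eq_of_pos hpos]
        exact repBr_succ_right _
      rw [e, ← List.append_assoc]
    · have hcond' : ¬(ys.take (findB ys ys.length) = ['c', 'h', 'a', 'r']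
          ∧ findB ys ys.length < (ys ++ ['*']).length
          ∧ (ys ++ ['*']).getD (findB ys ys.length) ' ' = '*') := by
        rintro ⟨h1, _, h3⟩
        exact hcond ⟨h1, hlt, by rw [← hg]; exact h3⟩
      rw [if_neg hcond', if_neg hcond, repBr_succ_right, ← List.append_assoc]
  · have heq : findB ys ys.length = ys.length := le_antisymm hle hge
    have hbase : ys ≠ ['c', 'h', 'a', 'r'] := hys
    rw [heq]
    rw [if_neg (by rintro ⟨h1, _, _⟩; exact hbase (by simpa using h1)),
        if_neg (by rintro ⟨_, h, _⟩; omega)]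
    simp [repBr]

-- B is the identity when the last character is no marker
theorem convB_plain (ys : List Char) (c : Char) (h1 : c ≠ '#') (h2 : c ≠ '*') :
    convB (ys ++ [c]) = ys ++ [c] := by
  have hlen : (ys ++ [c]).length = ys.length + 1 := by simp
  have hi : findB (ys ++ [c]) (ys ++ [c]).length = ys.length + 1 := by
    rw [hlen]
    simp only [findB, getD_concat_len]
    rw [if_neg (by rintro (h | h) <;> [exact h1 h; exact h2 h])]
  simp only [convB, hi]
  rw [if_neg (by rw [hlen]; rintro ⟨_, h, _⟩; omega)]
  simp [List.take_of_length_le (le_of_eq hlen), List.drop_eq_nil_of_le (le_of_eq hlen), repBr]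

theorem pyGet_concat (ys : List Char) (c : Char) :
    PySem.List.pyGet? (ys ++ [c]) (-1) = some c := by
  simp [PySem.List.pyGet?, PySem.List.pyIdx?]

-- A's recursion equations on a right append
theorem convA_hash (ys : List Char) : convA (ys ++ ['#']) = convA ys := by
  rw [convA.eq_def]
  split
  · next h => rw [pyGet_concat] at h; exact absurd h (by simp)
  · next c h =>
    rw [pyGet_concat] at h
    simp only [Option.some.injEq] at h
    subst h
    rw [if_pos rfl, pv_slice_neg_one, List.dropLast_concat]

theorem convA_star (ys : List Char) (hne : ys ++ ['*'] ≠ ['c', 'h', 'a', 'r', '*']) :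
    convA (ys ++ ['*']) = convA ys ++ ['[', ']'] := by
  rw [convA.eq_def]
  split
  · next h => rw [pyGet_concat] at h; exact absurd h (by simp)
  · next c h =>
    rw [pyGet_concat] at h
    simp only [Option.some.injEq] at h
    subst h
    rw [if_neg (by decide), if_neg hne, if_pos rfl, pv_slice_neg_one, List.dropLast_concat]

theorem convA_plain (ys : List Char) (c : Char) (h1 : c ≠ '#') (h2 : c ≠ '*') :
    convA (ys ++ [c]) = ys ++ [c] := by
  rw [convA.eq_def]
  split
  · next h => rw [pyGet_concat] at h; exact absurd h (by simp)
  · next c' h =>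
    rw [pyGet_concat] at h
    simp only [Option.some.injEq] at h
    subst h
    have hch : ys ++ [c] ≠ ['c', 'h', 'a', 'r', '*'] := by
      intro hcontra
      have : c = '*' := by
        have := congrArg (List.getLast? ·) hcontra
        simpa using this
      exact h2 this
    rw [if_neg h1, if_neg hch, if_neg h2]

theorem convA_charstar : convA ['c', 'h', 'a', 'r', '*'] = ['S', 't', 'r', 'i', 'n', 'g'] := by
  rw [convA.eq_def]
  split
  · next h => simp [PySem.List.pyGet?, PySem.List.pyIdx?] at h
  · next c h =>
    have : c = '*' := by
      simp [PySem.List.pyGet?, PySem.List.pyIdx?] at h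
      exact h.symm
    subst this
    rw [if_neg (by decide), if_pos rfl]

theorem main_lists : ∀ cs : List Char, (∃ c ∈ cs, ¬(c = '#' ∨ c = '*')) →
    convA cs = convB cs := by
  intro cs
  induction cs using List.reverseRecOn with
  | nil => rintro ⟨c, hc, _⟩; cases hc
  | append_singleton ys c ih =>
    intro ⟨d, hd, hdm⟩
    by_cases hch : c = '#'
    · subst hch
      have hys : ∃ e ∈ ys, ¬(e = '#' ∨ e = '*') := by
        refine ⟨d, ?_, hdm⟩
        rcases List.mem_append.mp hd with h | h
        · exact h
        · simp at h; subst h; exact absurd (Or.inl rfl) hdm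
      rw [convA_hash, convB_hash]; exact ih hys
    · by_cases hstar : c = '*'
      · subst hstar
        by_cases hcs : ys ++ ['*'] = ['c', 'h', 'a', 'r', '*']
        · have hys : ys = ['c', 'h', 'a', 'r'] := by
            have := congrArg List.dropLast hcs
            simpa [List.dropLast_concat] using this
          rw [hcs, convA_charstar]
          subst hys
          decide
        · have hys : ∃ e ∈ ys, ¬(e = '#' ∨ e = '*') := by
            refine ⟨d, ?_, hdm⟩
            rcases List.mem_append.mp hd with h | h
            · exact h
            · simp at h; subst h; exact absurd (Or.inr rfl) hdm
          have hys4 : ys ≠ ['c', 'h', 'a', 'r'] := by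
            intro hcontra; exact hcs (by rw [hcontra]; rfl)
          rw [convA_star ys hcs, convB_star ys hys4, ih hys]
      · rw [convA_plain ys c hch hstar, convB_plain ys c hch hstar]

-- ===== VERDICT (by name: the statement is the Claim_ definition above) =====
theorem convert_type_py_spec : Claim_equal_convert_type_py := by
  intro type_ _ hpre
  unfold Spec_convert_type_py convert_type_py convert_type_py_alt
  unfold Pre_convert_type_py at hpre
  obtain ⟨c, hc, hp⟩ := List.any_eq_true.mp hpre
  refine congrArg String.ofList (main_lists type_.toList ⟨c, hc, ?_⟩)
  simpa using hp
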